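-- pv_equiv track=rewrite | github.com/decarlin/stuartlab-scripts | python/rpy-1.0.3/tests/test_array.py | all_equal_3d
-- ===== SOURCE A (Python) =====
-- def all_equal_3d(vec1, vec2):
--
--     if len(vec1) != len(vec2): return False
--
--     for i in range(len(vec1)):
--
--         if len(vec1[i]) != len(vec2[i]): return False
--
--         for j in range( len(vec1[i]) ):
--
--             if len(vec1[i][j])!=len(vec2[i][j]): return False
--
--             for k in range( len(vec1[i][j]) ):
--
--                 if vec1[i][j][k] != vec2[i][j][k]: return False
--
--
--     return True
-- ===== SOURCE B (Python) =====
-- def all_equal_3d(vec1, vec2):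
--     return vec1 == vec2
-- ===== Notes on version B (the rewrite author's own statement) =====
-- stated objective: idiomatic
-- what changed: Replaces the hand-written triple nested index loop with Python's built-in structural list equality (vec1 == vec2).
import Mathlib
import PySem

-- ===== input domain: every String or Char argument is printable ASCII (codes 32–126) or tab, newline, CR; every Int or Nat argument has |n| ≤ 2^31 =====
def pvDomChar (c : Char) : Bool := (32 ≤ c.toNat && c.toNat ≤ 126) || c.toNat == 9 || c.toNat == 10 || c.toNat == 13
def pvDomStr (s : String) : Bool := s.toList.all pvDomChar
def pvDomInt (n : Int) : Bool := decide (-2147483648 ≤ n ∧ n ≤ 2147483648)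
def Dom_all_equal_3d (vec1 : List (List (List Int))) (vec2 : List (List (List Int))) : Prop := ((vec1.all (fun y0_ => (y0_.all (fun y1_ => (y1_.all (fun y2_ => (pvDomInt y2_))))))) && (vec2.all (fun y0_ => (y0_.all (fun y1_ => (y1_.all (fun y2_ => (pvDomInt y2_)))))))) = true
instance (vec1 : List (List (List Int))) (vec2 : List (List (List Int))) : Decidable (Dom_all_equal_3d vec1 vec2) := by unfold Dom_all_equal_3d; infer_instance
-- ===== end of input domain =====

-- B replaces A's hand-written triple nested index loop with structural list equality (idiomatic, not claimed faster).

-- ===== PORT A =====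
-- Literal transliteration: length guard, then a loop over range(len) at each of the
-- three levels; `.all` with an early `false` is exactly the for-loop that returns
-- False at the first mismatch and True at the end.
def all_equal_3d (vec1 : List (List (List Int))) (vec2 : List (List (List Int))) : Bool :=
  if PySem.List.len vec1 ≠ PySem.List.len vec2 then false
  else
    (PySem.List.pyRange 0 (PySem.List.len vec1) 1).all (fun i =>
      if PySem.List.len (PySem.List.pyGetD vec1 i []) ≠ PySem.List.len (PySem.List.pyGetD vec2 i []) then false
      else
        (PySem.List.pyRange 0 (PySem.List.len (PySem.List.pyGetD vec1 i [])) 1).all (fun j =>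
          if PySem.List.len (PySem.List.pyGetD (PySem.List.pyGetD vec1 i []) j []) ≠ PySem.List.len (PySem.List.pyGetD (PySem.List.pyGetD vec2 i []) j []) then false
          else
            (PySem.List.pyRange 0 (PySem.List.len (PySem.List.pyGetD (PySem.List.pyGetD vec1 i []) j [])) 1).all (fun k =>
              PySem.List.pyGetD (PySem.List.pyGetD (PySem.List.pyGetD vec1 i []) j []) k 0 ==
              PySem.List.pyGetD (PySem.List.pyGetD (PySem.List.pyGetD vec2 i []) j []) k 0)))

-- ===== PORT B =====
def all_equal_3d_alt (vec1 : List (List (List Int))) (vec2 : List (List (List Int))) : Bool :=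
  vec1 == vec2

-- ===== PRECONDITION & SPEC =====
def Spec_all_equal_3d (vec1 : List (List (List Int))) (vec2 : List (List (List Int))) (out : Bool) : Prop := out = all_equal_3d_alt vec1 vec2
instance (vec1 : List (List (List Int))) (vec2 : List (List (List Int))) (out : Bool) : Decidable (Spec_all_equal_3d vec1 vec2 out) := by unfold Spec_all_equal_3d; infer_instance

-- ===== CLAIM (what is proved, stated in full; the proofs are below) =====
def Claim_equal_all_equal_3d : Prop := ∀ (vec1 : List (List (List Int))) (vec2 : List (List (List Int))), Dom_all_equal_3d vec1 vec2 → Spec_all_equal_3d vec1 vec2 (all_equal_3d vec1 vec2)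

-- ===== LEMMAS AND PROOFS =====

-- One level of A's loop (length guard + indexwise test with `==` under it)
-- decides list equality.
theorem level_base {α : Type} [BEq α] [LawfulBEq α] (d : α) (a b : List α) :
    (if PySem.List.len a ≠ PySem.List.len b then false
     else (PySem.List.pyRange 0 (PySem.List.len a) 1).all
       (fun i => PySem.List.pyGetD a i d == PySem.List.pyGetD b i d)) = (a == b) := by
  by_cases h : a.length = b.length
  · rw [if_neg (by simp [h])]
    simp only [PySem.List.len_eq, PySem.List.pyRange_zero_natCast, List.all_map,
      Function.comp_def, PySem.List.pyGetD_natCast]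
    rw [Bool.eq_iff_iff]
    simp only [List.all_eq_true, List.mem_range, beq_iff_eq]
    constructor
    · intro hall
      apply List.ext_getElem h
      intro i h1 h2
      have := hall i h1
      rwa [List.getD_eq_getElem a d h1, List.getD_eq_getElem b d h2] at this
    · intro hab i _
      rw [hab]
  · rw [if_pos (by simp [h])]
    symm
    rw [beq_eq_false_iff_ne]
    intro hab
    exact h (by rw [hab])

-- Innermost loop = equality of the two innermost lists.
theorem leaf_eq (a b : List Int) :
    (if PySem.List.len a ≠ PySem.List.len b then false
     else (PySem.List.pyRange 0 (PySem.List.len a) 1).all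
       (fun k => PySem.List.pyGetD a k 0 == PySem.List.pyGetD b k 0)) = (a == b) :=
  level_base 0 a b

-- Middle loop (with the leaf loop inside) = equality of the two middle lists.
theorem mid_eq (a b : List (List Int)) :
    (if PySem.List.len a ≠ PySem.List.len b then false
     else (PySem.List.pyRange 0 (PySem.List.len a) 1).all
       (fun j =>
         if PySem.List.len (PySem.List.pyGetD a j []) ≠ PySem.List.len (PySem.List.pyGetD b j []) then false
         else (PySem.List.pyRange 0 (PySem.List.len (PySem.List.pyGetD a j [])) 1).all
           (fun k => PySem.List.pyGetD (PySem.List.pyGetD a j []) k 0 ==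
                     PySem.List.pyGetD (PySem.List.pyGetD b j []) k 0))) = (a == b) := by
  simp only [leaf_eq]
  exact level_base [] a b

-- ===== VERDICT (by name: the statement is the Claim_ definition above) =====
theorem all_equal_3d_spec : Claim_equal_all_equal_3d := by
  intro vec1 vec2 _
  unfold Spec_all_equal_3d all_equal_3d all_equal_3d_alt
  simp only [mid_eq]
  exact level_base [] vec1 vec2
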